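-- pv_equiv track=rewrite | github.com/FudanBSRL/DFM | double_pendulum/discover.py | num_candidates
-- ===== SOURCE A (Python) =====
-- def num_candidates(num_Lin):
--     cnt = num_Lin + 1
--     # cnt = num_Lin
--     for i in range(num_Lin):
--         cnt += 2
--
--     for i in range(num_Lin):
--         for j in range(i, num_Lin):
--             cnt += 3
--             if i != j :
--                 cnt += 2
--
--     for i in range(num_Lin):
--         for j in range(i, num_Lin):
--             for k in range(j, num_Lin):
--                 cnt += 1
--
--     return cnt
-- ===== SOURCE B (Python) =====
-- def num_candidates(num_Lin):
--     n = max(num_Lin, 0)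
--     return num_Lin + 1 + 5 * n * (n + 1) // 2 + n * (n + 1) * (n + 2) // 6
-- ===== Notes on version B (the rewrite author's own statement) =====
-- stated objective: faster
-- what changed: Replaced the three nested counting loops by a single closed-form cubic polynomial in num_Lin (clamped at zero), derived from the triangular and tetrahedral summation identities.
import Mathlib
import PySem

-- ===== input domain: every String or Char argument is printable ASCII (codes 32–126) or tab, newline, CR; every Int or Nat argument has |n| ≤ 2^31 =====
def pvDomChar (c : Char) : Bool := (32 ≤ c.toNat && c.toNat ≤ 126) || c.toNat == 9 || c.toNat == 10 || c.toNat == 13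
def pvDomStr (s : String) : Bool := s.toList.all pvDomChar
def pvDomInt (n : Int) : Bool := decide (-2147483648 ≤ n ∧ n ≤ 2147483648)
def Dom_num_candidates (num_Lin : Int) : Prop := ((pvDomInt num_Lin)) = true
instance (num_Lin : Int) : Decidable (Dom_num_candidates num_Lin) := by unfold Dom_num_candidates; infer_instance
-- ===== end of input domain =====

-- B replaces A's three nested counting loops by a closed-form polynomial (O(1) instead of O(n^3)).

-- ===== PORT A =====
def num_candidates (num_Lin : Int) : Int :=
  let cnt := num_Lin + 1
  let cnt := (PySem.List.pyRange 0 num_Lin 1).foldl (fun cnt _ => cnt + 2) cnt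
  let cnt := (PySem.List.pyRange 0 num_Lin 1).foldl (fun cnt i =>
    (PySem.List.pyRange i num_Lin 1).foldl (fun cnt j =>
      let cnt := cnt + 3
      if i ≠ j then cnt + 2 else cnt) cnt) cnt
  let cnt := (PySem.List.pyRange 0 num_Lin 1).foldl (fun cnt i =>
    (PySem.List.pyRange i num_Lin 1).foldl (fun cnt j =>
      (PySem.List.pyRange j num_Lin 1).foldl (fun cnt _ => cnt + 1) cnt) cnt) cnt
  cnt

-- ===== PORT B =====
def num_candidates_alt (num_Lin : Int) : Int :=
  let n := max num_Lin 0
  num_Lin + 1 + PySem.Int.floordiv (5 * n * (n + 1)) 2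
    + PySem.Int.floordiv (n * (n + 1) * (n + 2)) 6

-- ===== PRECONDITION & SPEC =====
def Spec_num_candidates (num_Lin : Int) (out : Int) : Prop := out = num_candidates_alt num_Lin
instance (num_Lin : Int) (out : Int) : Decidable (Spec_num_candidates num_Lin out) := by unfold Spec_num_candidates; infer_instance

-- ===== CLAIM (what is proved, stated in full; the proofs are below) =====
def Claim_equal_num_candidates : Prop := ∀ (num_Lin : Int), Dom_num_candidates num_Lin → Spec_num_candidates num_Lin (num_candidates num_Lin)

-- ===== LEMMAS AND PROOFS =====

-- Σ_{t=1}^{m} t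
def pvT1 : Nat → Int
  | 0 => 0
  | m + 1 => pvT1 m + ((m : Int) + 1)

-- Σ_{t=1}^{m} (5t - 2)
def pvS1 : Nat → Int
  | 0 => 0
  | m + 1 => pvS1 m + (5 * ((m : Int) + 1) - 2)

-- Σ_{t=1}^{m} pvT1 t
def pvS2 : Nat → Int
  | 0 => 0
  | m + 1 => pvS2 m + pvT1 (m + 1)

theorem pvT1_closed (m : Nat) : 2 * pvT1 m = (m : Int) * (m + 1) := by
  induction m with
  | zero => simp [pvT1]
  | succ m ih => simp only [pvT1]; push_cast; linarith

theorem pvS1_closed (m : Nat) : pvS1 m = 5 * pvT1 m - 2 * m := by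
  induction m with
  | zero => simp [pvS1, pvT1]
  | succ m ih => simp only [pvS1, pvT1]; push_cast; linarith

theorem pvS2_closed (m : Nat) : 6 * pvS2 m = (m : Int) * (m + 1) * (m + 2) := by
  induction m with
  | zero => simp [pvS2]
  | succ m ih =>
    have h1 := pvT1_closed (m + 1)
    simp only [pvS2]
    push_cast at *
    nlinarith [ih, h1]

-- Shift lemma: summing f(n - x) over range(n - d, n) equals G d for any G with
-- G 0 = 0 and G (d+1) = G d + f (d+1).
theorem pv_sum_shift (f : Int → Int) (G : Nat → Int) (h0 : G 0 = 0)
    (hs : ∀ d : Nat, G (d + 1) = G d + f ((d : Int) + 1)) :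
    ∀ (d : Nat) (n : Int),
      ((PySem.List.pyRange (n - d) n 1).map (fun x => f (n - x))).sum = G d := by
  intro d
  induction d with
  | zero => intro n; rw [PySem.List.pyRange_one_eq_nil (by omega : n ≤ n - ((0:Nat):Int))]; simp [h0]
  | succ d ih =>
    intro n
    rw [PySem.List.pyRange_one_cons (by push_cast; omega : n - ((d + 1 : Nat) : Int) < n)]
    have h2 : n - ((d + 1 : Nat) : Int) + 1 = n - (d : Nat) := by push_cast; ring
    rw [List.map_cons, List.sum_cons, h2, ih n, hs d]
    have h3 : n - (n - ((d + 1 : Nat) : Int)) = (d : Int) + 1 := by push_cast; ring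
    rw [h3]
    ring

-- innermost fold: adds one per element of range(j, n)
theorem pv_fold3 (j n c : Int) :
    (PySem.List.pyRange j n 1).foldl (fun cnt _ => cnt + 1) c = c + ((n - j).toNat : Int) := by
  rw [PySem.List.foldl_add (g := fun _ => (1 : Int))]
  simp [PySem.List.length_pyRange_one]

-- first loop
theorem pv_loop1 (n c : Int) :
    (PySem.List.pyRange 0 n 1).foldl (fun cnt _ => cnt + 2) c = c + 2 * (n.toNat : Int) := by
  rw [PySem.List.foldl_add (g := fun _ => (2 : Int))]
  simp [PySem.List.length_pyRange_one]
  omega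

-- inner fold of the double loop, starting at i < n
theorem pv_fold2 (i n c : Int) (h : i < n) :
    (PySem.List.pyRange i n 1).foldl
        (fun cnt j => let cnt := cnt + 3; if i ≠ j then cnt + 2 else cnt) c
      = c + (5 * (n - i) - 2) := by
  rw [PySem.List.pyRange_one_cons h, List.foldl_cons]
  simp only [ne_eq, not_true_eq_false, if_false]
  rw [PySem.List.foldl_congr_mem
      (g := fun cnt _ => cnt + 5)
      (h := by
        intro acc x hx
        rw [PySem.List.mem_pyRange_one] at hx
        rw [if_pos (by omega : ¬ i = x)]
        ring)]
  rw [PySem.List.foldl_add (g := fun _ => (5 : Int))]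
  simp [PySem.List.length_pyRange_one]
  omega

-- second loop (the double loop)
theorem pv_loop2 (n c : Int) :
    (PySem.List.pyRange 0 n 1).foldl (fun cnt i =>
        (PySem.List.pyRange i n 1).foldl
          (fun cnt j => let cnt := cnt + 3; if i ≠ j then cnt + 2 else cnt) cnt) c
      = c + pvS1 n.toNat := by
  rw [PySem.List.foldl_congr_mem
      (g := fun cnt i => cnt + (5 * (n - i) - 2))
      (h := by
        intro acc i hi
        rw [PySem.List.mem_pyRange_one] at hi
        exact pv_fold2 i n acc hi.2)]
  rw [PySem.List.foldl_add (g := fun i => 5 * (n - i) - 2)]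
  by_cases hn : 0 ≤ n
  · congr 1
    rw [show PySem.List.pyRange 0 n 1 = PySem.List.pyRange (n - (n.toNat : Int)) n 1 by
      congr 1; omega]
    exact pv_sum_shift (fun x => 5 * x - 2) pvS1 rfl
      (by intro d; simp only [pvS1]) n.toNat n
  · rw [PySem.List.pyRange_one_eq_nil (by omega : n ≤ 0)]
    have : n.toNat = 0 := by omega
    simp [this, pvS1]

-- third loop (the triple loop)
theorem pv_loop3 (n c : Int) :
    (PySem.List.pyRange 0 n 1).foldl (fun cnt i =>
        (PySem.List.pyRange i n 1).foldl (fun cnt j =>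
          (PySem.List.pyRange j n 1).foldl (fun cnt _ => cnt + 1) cnt) cnt) c
      = c + pvS2 n.toNat := by
  have hT : ∀ d : Nat, pvT1 (d + 1) = pvT1 d + (((d : Int) + 1).toNat : Int) := by
    intro d
    have h : (((d : Int) + 1).toNat : Int) = (d : Int) + 1 := by omega
    rw [h]; simp [pvT1]
  rw [PySem.List.foldl_congr_mem
      (g := fun cnt i => cnt + pvT1 (n - i).toNat)
      (h := by
        intro acc i hi
        rw [PySem.List.mem_pyRange_one] at hi
        rw [PySem.List.foldl_congr_mem
            (g := fun cnt j => cnt + ((n - j).toNat : Int))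
            (h := by intro a j _; exact pv_fold3 j n a)]
        rw [PySem.List.foldl_add (g := fun j => ((n - j).toNat : Int))]
        congr 1
        rw [show PySem.List.pyRange i n 1 = PySem.List.pyRange (n - ((n - i).toNat : Int)) n 1 by
          congr 1; omega]
        exact pv_sum_shift (fun x => (x.toNat : Int)) pvT1 rfl hT (n - i).toNat n)]
  rw [PySem.List.foldl_add (g := fun i => pvT1 (n - i).toNat)]
  by_cases hn : 0 ≤ n
  · congr 1
    rw [show PySem.List.pyRange 0 n 1 = PySem.List.pyRange (n - (n.toNat : Int)) n 1 by
      congr 1; omega]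
    exact pv_sum_shift (fun x => pvT1 x.toNat) pvS2 rfl
      (by
        intro d
        have h : (((d : Int) + 1).toNat : Nat) = d + 1 := by omega
        simp only [pvS2, h]) n.toNat n
  · rw [PySem.List.pyRange_one_eq_nil (by omega : n ≤ 0)]
    have : n.toNat = 0 := by omega
    simp [this, pvS2]

theorem pv_A_sum (n : Int) :
    num_candidates n = n + 1 + 2 * (n.toNat : Int) + pvS1 n.toNat + pvS2 n.toNat := by
  unfold num_candidates
  simp only [pv_loop1, pv_loop2, pv_loop3]

-- ===== VERDICT (by name: the statement is the Claim_ definition above) =====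
theorem num_candidates_spec : Claim_equal_num_candidates := by
  intro n _
  unfold Spec_num_candidates
  rw [show num_candidates_alt n
      = n + 1 + PySem.Int.floordiv (5 * max n 0 * (max n 0 + 1)) 2
        + PySem.Int.floordiv (max n 0 * (max n 0 + 1) * (max n 0 + 2)) 6 from rfl]
  rw [pv_A_sum]
  set m := n.toNat with hm
  by_cases hn : 0 ≤ n
  · have hnm : n = (m : Int) := by omega
    have hmax : max n 0 = n := by omega
    rw [hmax]
    have hfd1 : PySem.Int.floordiv (5 * n * (n + 1)) 2 = 5 * pvT1 m := by
      have h : 5 * n * (n + 1) = (5 * pvT1 m) * 2 := by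
        have := pvT1_closed m; rw [hnm]; linarith
      rw [h, PySem.Int.floordiv]
      exact Int.mul_fdiv_cancel _ (by norm_num)
    have hfd2 : PySem.Int.floordiv (n * (n + 1) * (n + 2)) 6 = pvS2 m := by
      have h : n * (n + 1) * (n + 2) = pvS2 m * 6 := by
        have := pvS2_closed m; rw [hnm]; linarith
      rw [h, PySem.Int.floordiv]
      exact Int.mul_fdiv_cancel _ (by norm_num)
    rw [hfd1, hfd2, pvS1_closed m]
    ring
  · have hm0 : m = 0 := by omega
    have hmax : max n 0 = 0 := by omega
    rw [hmax, hm0]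
    simp [pvS1, pvS2, PySem.Int.floordiv]
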